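-- pv_equiv track=rewrite | github.com/alightcap/2425 | 2425 7I/Python/Student Projects/OforiJoshuaProject.py | make_hidden_word
-- ===== SOURCE A (Python) =====
-- def make_hidden_word(secret_word:str, correct_letters: str) -> str:
--     hidden_word = ""
--
--     for letter in secret_word:
--         if letter in correct_letters:
--             hidden_word += letter
--
--         elif letter.isalpha():
--             hidden_word += "$"
--         else:
--             hidden_word += letter
--
--
--     return hidden_word
-- ===== SOURCE B (Python) =====
-- def make_hidden_word(secret_word: str, correct_letters: str) -> str:
--     # Build a translation table once from the distinct characters of secret_word,
--     # then mask everything in a single library-driven pass.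
--     table = {ord(c): "$" for c in set(secret_word)
--              if c.isalpha() and c not in correct_letters}
--     return secret_word.translate(table)
-- ===== Notes on version B (the rewrite author's own statement) =====
-- stated objective: faster
-- what changed: Replaces the per-character if/elif/else string-concatenation loop with a translation table precomputed from the distinct characters of secret_word plus one str.translate pass.
import Mathlib
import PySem

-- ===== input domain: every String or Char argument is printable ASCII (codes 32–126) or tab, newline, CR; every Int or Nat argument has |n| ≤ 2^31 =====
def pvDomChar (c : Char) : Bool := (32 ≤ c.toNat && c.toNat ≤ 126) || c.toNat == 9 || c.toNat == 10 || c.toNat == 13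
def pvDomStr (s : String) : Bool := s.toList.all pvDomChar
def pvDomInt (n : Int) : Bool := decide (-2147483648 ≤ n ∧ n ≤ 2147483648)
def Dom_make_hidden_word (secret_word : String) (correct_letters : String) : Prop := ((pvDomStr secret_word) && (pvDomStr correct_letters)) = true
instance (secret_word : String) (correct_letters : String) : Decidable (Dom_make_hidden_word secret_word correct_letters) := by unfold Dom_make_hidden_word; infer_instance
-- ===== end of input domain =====

-- B replaces A's per-character if/elif/else loop by a translation table built once
-- from the distinct characters of secret_word, then a single translate pass (idiomatic).

-- ===== PORT A =====
-- literal port: string built up by += in a loop over secret_word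
def make_hidden_word (secret_word : String) (correct_letters : String) : String :=
  String.ofList (secret_word.toList.foldl (fun hidden_word letter =>
    if letter ∈ correct_letters.toList then hidden_word ++ [letter]
    else if PySem.Chars.isalpha letter then hidden_word ++ ['$']
    else hidden_word ++ [letter]) [])

-- ===== PORT B =====
-- table = {ord(c): '$' for c in set(secret_word) if c.isalpha() and c not in correct_letters}
def mhwTable (secret_word : String) (correct_letters : String) : PySem.Dict Char Char :=
  (PySem.Set.ofList secret_word.toList).foldl
    (fun d c =>
      if PySem.Chars.isalpha c && !(c ∈ correct_letters.toList) then d.insert c '$' else d)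
    PySem.Dict.empty

-- secret_word.translate(table): each char is replaced by its table entry, or kept
def make_hidden_word_alt (secret_word : String) (correct_letters : String) : String :=
  String.ofList (secret_word.toList.map (fun c => (mhwTable secret_word correct_letters).getD c c))

-- ===== PRECONDITION & SPEC =====
def Spec_make_hidden_word (secret_word : String) (correct_letters : String) (out : String) : Prop := out = make_hidden_word_alt secret_word correct_letters
instance (secret_word : String) (correct_letters : String) (out : String) : Decidable (Spec_make_hidden_word secret_word correct_letters out) := by unfold Spec_make_hidden_word; infer_instance

-- ===== CLAIM (what is proved, stated in full; the proofs are below) =====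
def Claim_equal_make_hidden_word : Prop := ∀ (secret_word : String) (correct_letters : String), Dom_make_hidden_word secret_word correct_letters → Spec_make_hidden_word secret_word correct_letters (make_hidden_word secret_word correct_letters)

-- ===== LEMMAS AND PROOFS =====

-- the per-character value A appends
def mhwMask (correct_letters : String) (c : Char) : Char :=
  if c ∈ correct_letters.toList then c
  else if PySem.Chars.isalpha c then '$' else c

-- the table's lookup, characterised over the fold that builds it
theorem mhwTable_get? (cl : String) (cs : List Char) (d : PySem.Dict Char Char) (x : Char) :
    (cs.foldl (fun d c =>
        if PySem.Chars.isalpha c && !(c ∈ cl.toList) then d.insert c '$' else d) d).get? x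
      = if x ∈ cs ∧ (PySem.Chars.isalpha x && !(x ∈ cl.toList)) = true
        then some '$' else d.get? x := by
  induction cs generalizing d with
  | nil => simp
  | cons c cs ih =>
    simp only [List.foldl_cons, ih]
    by_cases hx : x ∈ cs ∧ (PySem.Chars.isalpha x && !(x ∈ cl.toList)) = true
    · simp [hx]
    · rw [if_neg hx]
      by_cases hxc : x = c
      · subst hxc
        by_cases hc : (PySem.Chars.isalpha x && !(x ∈ cl.toList)) = true
        · simp [hc, PySem.Dict.get?_insert_self]
        · simp [hc]
      · have hR : ¬(x ∈ c :: cs ∧ (PySem.Chars.isalpha x && !(x ∈ cl.toList)) = true) := by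
          rintro ⟨hm, hcx⟩
          exact hx ⟨(List.mem_cons.mp hm).resolve_left hxc, hcx⟩
        rw [if_neg hR]
        by_cases hc : (PySem.Chars.isalpha c && !(c ∈ cl.toList)) = true
        · simp [hc, PySem.Dict.get?_insert_of_ne _ _ hxc]
        · simp [hc]

theorem mhwTable_getD (sw cl : String) (c : Char) (hc : c ∈ sw.toList) :
    (mhwTable sw cl).getD c c = mhwMask cl c := by
  unfold mhwTable mhwMask
  rw [PySem.Dict.getD_eq_get?_getD, mhwTable_get?]
  by_cases h1 : c ∈ cl.toList
  · simp [h1, PySem.Set.mem_ofList]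
  · by_cases h2 : PySem.Chars.isalpha c = true <;>
      simp [h1, h2, PySem.Set.mem_ofList, hc]

theorem mhw_A_eq_map (sw cl : String) :
    make_hidden_word sw cl = String.ofList (sw.toList.map (mhwMask cl)) := by
  unfold make_hidden_word
  congr 1
  have h : (fun (hidden_word : List Char) (letter : Char) =>
      if letter ∈ cl.toList then hidden_word ++ [letter]
      else if PySem.Chars.isalpha letter then hidden_word ++ ['$']
      else hidden_word ++ [letter])
    = fun acc c => acc ++ [mhwMask cl c] := by
    funext acc c; unfold mhwMask; split_ifs <;> rfl
  rw [h, PySem.List.foldl_append_singleton_eq_map]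
  simp

-- ===== VERDICT (by name: the statement is the Claim_ definition above) =====
theorem make_hidden_word_spec : Claim_equal_make_hidden_word := by
  intro sw cl _
  unfold Spec_make_hidden_word make_hidden_word_alt
  rw [mhw_A_eq_map]
  congr 1
  exact List.map_congr_left fun c hc => (mhwTable_getD sw cl c hc).symm
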